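-- pv_equiv track=rewrite | github.com/AP-MI-2021/lab-3-PavelGeorge | main.py | get_longest_same_bit_counts
-- ===== SOURCE A (Python) =====
-- def bit_1_counter_in_base_2(x: int) -> int:
--     '''
--     Returneaza numarul de cate ori apare 1 in scrierea binara
--     :param x: numar intreg
--     :return: counter: numar intreg
--     '''
--     counter = 0
--     while x:
--         counter = counter + x % 2
--         x = x//2
--     return counter
--
-- def get_longest_same_bit_counts(lst: list[int]) -> list[int]:
--     '''
--     Returneaza subsecventa maxima cu proprietea ca toate elementele sa aiba acelasi numar de cifra 1 in scrierea binara
--     Functia afla subsecventa maxima prin verificarea continua a doi termeni consecutivi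
--     :param lst: lista de numere intregi
--     :return: subsecventa_maxima: lista de numere intregi
--     '''
--     i = 1
--     pozitia_initiala = 0
--     pozitia_finala = 0
--     subsecventa_maxima = [lst[0]]
--     while i < len(lst):
--         if bit_1_counter_in_base_2(lst[i-1]) == bit_1_counter_in_base_2(lst[i]):
--             pozitia_finala = i
--         else:
--             pozitia_initiala = i
--         if len(lst[pozitia_initiala:pozitia_finala+1]) > len(subsecventa_maxima):
--             subsecventa_maxima = lst[pozitia_initiala:pozitia_finala+1]
--         i=i+1
--     return subsecventa_maxima
-- ===== SOURCE B (Python) =====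
-- def get_longest_same_bit_counts(lst: list[int]) -> list[int]:
--     '''Two stages: first split the list into the maximal runs of consecutive
--     elements with equal bit_count, then scan the run list once and keep the
--     first run of maximal length.'''
--     runs = []
--     for x in lst:
--         if runs and runs[-1][0].bit_count() == x.bit_count():
--             runs[-1].append(x)
--         else:
--             runs.append([x])
--     best = runs[0]
--     for run in runs[1:]:
--         if len(run) > len(best):
--             best = run
--     return best
-- ===== Notes on version B (the rewrite author's own statement) =====
-- stated objective: alternative
-- what changed: A scans indices, rebuilding and measuring a candidate slice of the original list on every iteration; B is a two-stage decomposition: it first splits the list into the maximal runs of equal bit_count, then scans that run list once for the first run of maximal length.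
import Mathlib
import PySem

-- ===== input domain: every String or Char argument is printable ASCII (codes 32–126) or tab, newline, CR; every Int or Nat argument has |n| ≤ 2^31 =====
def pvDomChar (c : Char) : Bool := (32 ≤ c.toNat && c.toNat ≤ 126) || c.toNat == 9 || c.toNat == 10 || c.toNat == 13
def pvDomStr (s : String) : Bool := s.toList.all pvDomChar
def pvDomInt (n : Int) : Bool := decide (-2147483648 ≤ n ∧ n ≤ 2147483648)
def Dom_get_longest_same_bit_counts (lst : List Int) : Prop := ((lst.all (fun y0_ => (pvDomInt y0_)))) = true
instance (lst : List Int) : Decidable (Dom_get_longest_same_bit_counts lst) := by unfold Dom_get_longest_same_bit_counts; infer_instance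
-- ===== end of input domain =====

-- B replaces A's index scan with per-iteration candidate slicing by a two-stage
-- decomposition: split the list into the maximal runs of equal bit_count, then
-- scan the run list once for the first run of maximal length.

-- ===== PORT A =====
-- Python's 'while x:' loop; the fuel x.natAbs + 1 is ample for every x ≥ 0
-- (on x < 0 the Python loop never terminates; Pre_ excludes those inputs).
def bit_1_counter_aux : Nat → Int → Int → Int
  | 0, _, counter => counter
  | f + 1, x, counter =>
    if x ≠ 0 then bit_1_counter_aux f (PySem.Int.floordiv x 2) (counter + PySem.Int.mod x 2)
    else counter

def bit_1_counter_in_base_2 (x : Int) : Int := bit_1_counter_aux (x.natAbs + 1) x 0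

-- the while-loop of A: state (i, pozitia_initiala, pozitia_finala, subsecventa_maxima)
def pvLoopA (lst : List Int) (n i pozIni pozFin : Nat) (best : List Int) : List Int :=
  if _h : i < n then
    let c := bit_1_counter_in_base_2 (lst.getD (i - 1) 0) = bit_1_counter_in_base_2 (lst.getD i 0)
    let pozIni' := if c then pozIni else i
    let pozFin' := if c then i else pozFin
    let cand := PySem.List.slice lst (some (pozIni' : Int)) (some ((pozFin' : Int) + 1))
    let best' := if cand.length > best.length then cand else best
    pvLoopA lst n (i + 1) pozIni' pozFin' best'
  else best
termination_by n - i

def get_longest_same_bit_counts (lst : List Int) : List Int :=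
  pvLoopA lst lst.length 1 0 0 [lst.getD 0 0]

-- ===== PORT B =====
-- one iteration of Source B's first loop: 'if runs and runs[-1][0].bit_count() == x.bit_count():
-- runs[-1].append(x) else: runs.append([x])' (runs[-1][0] is the head of the last run,
-- which is never empty; headD 0 only totalises the lookup)
def pvRunStep (runs : List (List Int)) (x : Int) : List (List Int) :=
  match runs.getLast? with
  | some r =>
      if PySem.Int.bitCount (r.headD 0) = PySem.Int.bitCount x then
        runs.dropLast ++ [r ++ [x]]
      else runs ++ [[x]]
  | none => [[x]]

-- one iteration of Source B's second loop: 'if len(run) > len(best): best = run'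
def pvBestStep (best run : List Int) : List Int :=
  if run.length > best.length then run else best

def get_longest_same_bit_counts_alt (lst : List Int) : List Int :=
  let runs := lst.foldl pvRunStep []
  (runs.drop 1).foldl pvBestStep (runs.headD [])  -- runs[0]: Python raises on empty lst, which Pre_ excludes

-- ===== PRECONDITION & SPEC =====
-- Pre_ excludes exactly the inputs on which A does not return: the empty list (IndexError
-- when A indexes the first element; B's runs[0] raises there too) and lists of length at
-- least two containing a negative element (A's popcount while-loop never terminates for
-- negative x; with a single element the loop body is never entered, so a lone negative
-- stays admitted).
def Pre_get_longest_same_bit_counts (lst : List Int) : Prop :=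
  lst ≠ [] ∧ (lst.length = 1 ∨ ∀ x ∈ lst, 0 ≤ x)
instance (lst : List Int) : Decidable (Pre_get_longest_same_bit_counts lst) := by
  unfold Pre_get_longest_same_bit_counts; infer_instance
def pvWitness_get_longest_same_bit_counts : List Int := [3, 5, 6, 7]

def Spec_get_longest_same_bit_counts (lst : List Int) (out : List Int) : Prop :=
  out = get_longest_same_bit_counts_alt lst
instance (lst : List Int) (out : List Int) : Decidable (Spec_get_longest_same_bit_counts lst out) := by
  unfold Spec_get_longest_same_bit_counts; infer_instance

-- ===== CLAIM (what is proved, stated in full; the proofs are below) =====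
def Claim_equal_get_longest_same_bit_counts : Prop :=
  ∀ (lst : List Int), Dom_get_longest_same_bit_counts lst →
    Pre_get_longest_same_bit_counts lst →
      Spec_get_longest_same_bit_counts lst (get_longest_same_bit_counts lst)

-- ===== LEMMAS AND PROOFS =====

-- A's hand-rolled popcount agrees with int.bit_count() on nonnegative inputs
lemma pv_bitaux_eq (f : Nat) : ∀ (x c : Int), 0 ≤ x → x.natAbs < f →
    bit_1_counter_aux f x c = c + (PySem.Int.bitCount x : Int) := by
  induction f with
  | zero => intro x c _ h; omega
  | succ f ih =>
    intro x c hx hf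
    by_cases h0 : x = 0
    · subst h0; simp [bit_1_counter_aux, PySem.Int.bitCount_zero]
    · have hxpos : 0 < x := lt_of_le_of_ne hx (Ne.symm h0)
      have hfd : PySem.Int.floordiv x 2 = x / 2 :=
        PySem.Int.floordiv_eq_ediv_of_pos (by omega)
      have hrec : bit_1_counter_aux f (PySem.Int.floordiv x 2)
          (c + PySem.Int.mod x 2)
          = (c + PySem.Int.mod x 2) + (PySem.Int.bitCount (PySem.Int.floordiv x 2) : Int) := by
        apply ih
        · rw [hfd]; exact Int.ediv_nonneg hx (by omega)
        · rw [hfd]; omega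
      have hbc := PySem.Int.bitCount_of_pos (n := x) hxpos
      have hmnn : 0 ≤ PySem.Int.mod x 2 := PySem.Int.mod_nonneg x (by omega)
      simp only [bit_1_counter_aux, if_pos h0, hrec, hbc]
      omega

lemma pv_bitcount_eq (x : Int) (hx : 0 ≤ x) :
    bit_1_counter_in_base_2 x = (PySem.Int.bitCount x : Int) := by
  have := pv_bitaux_eq (x.natAbs + 1) x 0 hx (by omega)
  simpa [bit_1_counter_in_base_2] using this

lemma pv_getD_nonneg (lst : List Int) (h : ∀ x ∈ lst, 0 ≤ x) (k : Nat) :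
    0 ≤ lst.getD k 0 := by
  by_cases hk : k < lst.length
  · rw [List.getD_eq_getElem lst 0 hk]; exact h _ (List.getElem_mem hk)
  · rw [List.getD_eq_default lst 0 (by omega)]

-- slice with Nat bounds is drop/take (cited form specialised to our use)
lemma pv_slice_nat (lst : List Int) (a b : Nat) :
    PySem.List.slice lst (some (a : Int)) (some (b : Int)) = (lst.drop a).take (b - a) :=
  PySem.List.slice_natCast lst a b

-- proof-side summary of one iteration of A's while-loop as a step on (start, bestStart, bestLen)
def pvStepB (lst : List Int) (acc : Nat × Nat × Nat) (i : Nat) : Nat × Nat × Nat :=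
  if PySem.Int.bitCount (lst.getD (i - 1) 0) ≠ PySem.Int.bitCount (lst.getD i 0) then
    (i, acc.2.1, acc.2.2)
  else if i - acc.1 + 1 > acc.2.2 then (acc.1, acc.1, i - acc.1 + 1)
  else acc

-- A's while-loop equals the index fold, under the loop invariant
lemma pv_loop_eq (lst : List Int) (hnn : ∀ x ∈ lst, 0 ≤ x) :
    ∀ (m i pozIni fin bs bl : Nat),
      i + m = lst.length → 1 ≤ i → pozIni < i → (fin + 1 = i ∨ fin < pozIni) →
      bs + bl ≤ lst.length → 1 ≤ bl →
      pvLoopA lst lst.length i pozIni fin ((lst.drop bs).take bl) =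
        (let r := (List.range' i m).foldl (pvStepB lst) (pozIni, bs, bl)
         PySem.List.slice lst (some (r.2.1 : Int)) (some ((r.2.1 : Int) + (r.2.2 : Int)))) := by
  intro m
  induction m with
  | zero =>
    intro i pozIni fin bs bl hm _ _ _ hbs hbl
    rw [pvLoopA, dif_neg (show ¬ i < lst.length by omega)]
    simp only [List.range'_zero, List.foldl_nil]
    rw [show ((bs : Int) + (bl : Int)) = ((bs + bl : Nat) : Int) by push_cast; ring,
        pv_slice_nat]
    congr 1
    omega
  | succ m ih =>
    intro i pozIni fin bs bl hm hi hpi hfin hbs hbl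
    have hin : i < lst.length := by omega
    have hlenbest : ((lst.drop bs).take bl).length = bl := by
      simp only [List.length_take, List.length_drop]; omega
    have hc : (bit_1_counter_in_base_2 (lst.getD (i - 1) 0) =
               bit_1_counter_in_base_2 (lst.getD i 0)) ↔
              (PySem.Int.bitCount (lst.getD (i - 1) 0) =
               PySem.Int.bitCount (lst.getD i 0)) := by
      rw [pv_bitcount_eq _ (pv_getD_nonneg lst hnn _),
          pv_bitcount_eq _ (pv_getD_nonneg lst hnn _)]
      exact Int.natCast_inj
    rw [List.range'_succ, List.foldl_cons, pvLoopA, dif_pos hin]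
    by_cases hcc : PySem.Int.bitCount (lst.getD (i - 1) 0) =
                   PySem.Int.bitCount (lst.getD i 0)
    · -- equal popcounts: pozitia_finala := i ; the fold possibly updates the best triple
      have hcA : bit_1_counter_in_base_2 (lst.getD (i - 1) 0) =
                 bit_1_counter_in_base_2 (lst.getD i 0) := hc.mpr hcc
      simp only [if_pos hcA]
      have hcand : PySem.List.slice lst (some (pozIni : Int)) (some ((i : Int) + 1)) =
          (lst.drop pozIni).take (i + 1 - pozIni) := by
        rw [show ((i : Int) + 1) = ((i + 1 : Nat) : Int) by push_cast; ring, pv_slice_nat]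
      have hlencand : ((lst.drop pozIni).take (i + 1 - pozIni)).length = i + 1 - pozIni := by
        simp only [List.length_take, List.length_drop]; omega
      have hstep : pvStepB lst (pozIni, bs, bl) i =
          if i - pozIni + 1 > bl then (pozIni, pozIni, i - pozIni + 1) else (pozIni, bs, bl) := by
        simp only [pvStepB]
        rw [if_neg (not_not_intro hcc)]
      rw [hcand, hstep]
      by_cases hgt : bl < i + 1 - pozIni
      · rw [if_pos (show ((lst.drop bs).take bl).length <
              ((lst.drop pozIni).take (i + 1 - pozIni)).length by
            rw [hlencand, hlenbest]; omega),
            if_pos (show i - pozIni + 1 > bl by omega),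
            show i + 1 - pozIni = i - pozIni + 1 by omega]
        have := ih (i + 1) pozIni i pozIni (i - pozIni + 1) (by omega) (by omega)
          (by omega) (by omega) (by omega) (by omega)
        simpa using this
      · rw [if_neg (show ¬ ((lst.drop bs).take bl).length <
              ((lst.drop pozIni).take (i + 1 - pozIni)).length by
            rw [hlencand, hlenbest]; omega),
            if_neg (show ¬ i - pozIni + 1 > bl by omega)]
        have := ih (i + 1) pozIni i bs bl (by omega) (by omega) (by omega)
          (by omega) hbs hbl
        simpa using this
    · -- different popcounts: pozitia_initiala := i ; A's candidate slice is empty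
      have hcA : ¬ (bit_1_counter_in_base_2 (lst.getD (i - 1) 0) =
                    bit_1_counter_in_base_2 (lst.getD i 0)) := fun h => hcc (hc.mp h)
      simp only [if_neg hcA]
      have hcand : PySem.List.slice lst (some (i : Int)) (some ((fin : Int) + 1)) =
          (lst.drop i).take (fin + 1 - i) := by
        rw [show ((fin : Int) + 1) = ((fin + 1 : Nat) : Int) by push_cast; ring, pv_slice_nat]
      have hstep : pvStepB lst (pozIni, bs, bl) i = (i, bs, bl) := by
        simp only [pvStepB]
        rw [if_pos hcc]
      rw [hcand, show fin + 1 - i = 0 by omega, hstep,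
          if_neg (show ¬ ((lst.drop bs).take bl).length <
              ((lst.drop i).take 0).length by
            simp only [List.take_zero, List.length_nil, hlenbest]; omega)]
      have := ih (i + 1) i fin bs bl (by omega) (by omega) (by omega)
        (by omega) hbs hbl
      simpa using this

-- B's answer as a function of the run list
def pvBval (rs : List (List Int)) : List Int :=
  (rs.drop 1).foldl pvBestStep (rs.headD [])

lemma pv_bval_concat (rs : List (List Int)) (r : List Int) (h : rs ≠ []) :
    pvBval (rs ++ [r]) = pvBestStep (pvBval rs) r := by
  obtain ⟨a, t, rfl⟩ := List.exists_cons_of_ne_nil h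
  simp [pvBval, List.foldl_append]

-- head of the current run is lst[s]
lemma pv_head_cur (lst : List Int) (s m : Nat) (hm : 1 ≤ m) (hs : s < lst.length) :
    ((lst.drop s).take m).headD 0 = lst.getD s 0 := by
  obtain ⟨m', rfl⟩ : ∃ m', m = m' + 1 := ⟨m - 1, by omega⟩
  rw [List.getD_eq_getElem lst 0 hs, List.drop_eq_getElem_cons hs, List.take_succ_cons]
  rfl

-- extending the current run by the next element
lemma pv_cur_extend (lst : List Int) (s i : Nat) (hs : s ≤ i + 1) (hi : i + 1 < lst.length) :
    (lst.drop s).take (i + 1 - s) ++ [lst.getD (i + 1) 0] = (lst.drop s).take (i + 2 - s) := by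
  rw [show i + 2 - s = (i + 1 - s) + 1 by omega, List.take_add_one]
  have hx : (lst.drop s)[i + 1 - s]? = some lst[i + 1] := by
    rw [List.getElem?_drop, show s + (i + 1 - s) = i + 1 by omega,
        List.getElem?_eq_getElem hi]
  rw [hx, List.getD_eq_getElem lst 0 hi]
  rfl

lemma pv_take_concat (lst : List Int) (i : Nat) (hi : i < lst.length) :
    lst.take (i + 1) = lst.take i ++ [lst.getD i 0] := by
  rw [List.take_add_one, List.getElem?_eq_getElem hi, List.getD_eq_getElem lst 0 hi]
  rfl

lemma pv_take_one_drop (lst : List Int) (i : Nat) (hi : i < lst.length) :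
    (lst.drop i).take 1 = [lst.getD i 0] := by
  rw [List.drop_eq_getElem_cons hi, List.getD_eq_getElem lst 0 hi]
  rfl

-- the main correspondence: A's fold state vs B's run list, after indices 1..i
lemma pv_invariant (lst : List Int) :
    ∀ i, i < lst.length →
    ∃ s p pl rs',
      (List.range' 1 i).foldl (pvStepB lst) (0, 0, 1) =
        (s, if i + 1 - s > pl then (s, i + 1 - s) else (p, pl)) ∧
      s ≤ i ∧
      (lst.take (i + 1)).foldl pvRunStep [] = rs' ++ [(lst.drop s).take (i + 1 - s)] ∧
      (∀ j, s ≤ j → j ≤ i →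
        PySem.Int.bitCount (lst.getD j 0) = PySem.Int.bitCount (lst.getD s 0)) ∧
      ((rs' = [] ∧ pl = 0) ∨
        (rs' ≠ [] ∧ pvBval rs' = (lst.drop p).take pl ∧ 1 ≤ pl ∧ p + pl ≤ lst.length)) := by
  intro i
  induction i with
  | zero =>
    intro h0
    refine ⟨0, 0, 0, [], ?_, le_refl 0, ?_, ?_, Or.inl ⟨rfl, rfl⟩⟩
    · simp
    · obtain ⟨a, t, rfl⟩ := List.exists_cons_of_ne_nil (List.ne_nil_of_length_pos h0)
      simp [pvRunStep]
    · intro j h1 h2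
      have : j = 0 := by omega
      simp [this]
  | succ i ih =>
    intro hi1
    obtain ⟨s, p, pl, rs', hfold, hsle, hruns, hconst, hbest⟩ := ih (by omega)
    have hslen : s < lst.length := by omega
    have hcurlen : ((lst.drop s).take (i + 1 - s)).length = i + 1 - s := by
      simp only [List.length_take, List.length_drop]; omega
    have hfold' : (List.range' 1 (i + 1)).foldl (pvStepB lst) (0, 0, 1) =
        pvStepB lst ((List.range' 1 i).foldl (pvStepB lst) (0, 0, 1)) (1 + i) := by
      rw [List.range'_1_concat, List.foldl_append, List.foldl_cons, List.foldl_nil]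
    have hruns' : (lst.take (i + 1 + 1)).foldl pvRunStep [] =
        pvRunStep (rs' ++ [(lst.drop s).take (i + 1 - s)]) (lst.getD (i + 1) 0) := by
      rw [pv_take_concat lst (i + 1) hi1, List.foldl_append, hruns,
          List.foldl_cons, List.foldl_nil]
    have hhead : ((lst.drop s).take (i + 1 - s)).headD 0 = lst.getD s 0 :=
      pv_head_cur lst s (i + 1 - s) (by omega) hslen
    have hpl0 : pl = 0 ∨ 1 ≤ pl := by
      rcases hbest with ⟨_, h⟩ | ⟨_, _, h, _⟩
      exacts [Or.inl h, Or.inr h]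
    by_cases hcc : PySem.Int.bitCount (lst.getD i 0) = PySem.Int.bitCount (lst.getD (i + 1) 0)
    · -- run continues
      have hcs : PySem.Int.bitCount (lst.getD (i + 1) 0) =
          PySem.Int.bitCount (lst.getD s 0) := by
        rw [← hcc]; exact hconst i hsle (le_refl i)
      refine ⟨s, p, pl, rs', ?_, by omega, ?_, ?_, hbest⟩
      · rw [hfold', hfold]
        simp only [pvStepB, show (1 + i : Nat) = i + 1 by omega, show i + 1 - 1 = i by omega]
        rw [if_neg (not_not_intro hcc)]
        by_cases h2 : i + 1 - s > pl
        · rw [if_pos h2]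
          simp only
          rw [if_pos (show i + 1 - s + 1 > i + 1 - s by omega),
              if_pos (show i + 1 + 1 - s > pl by omega),
              show i + 1 - s + 1 = i + 1 + 1 - s by omega]
        · rw [if_neg h2]
          simp only
          by_cases h3 : i + 1 - s + 1 > pl
          · rw [if_pos h3, if_pos (show i + 1 + 1 - s > pl by omega),
                show i + 1 - s + 1 = i + 1 + 1 - s by omega]
          · rw [if_neg h3, if_neg (show ¬ i + 1 + 1 - s > pl by omega)]
      · rw [hruns']
        simp only [pvRunStep, List.getLast?_concat]
        rw [hhead, if_pos hcs.symm, List.dropLast_concat,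
            pv_cur_extend lst s i (by omega) hi1]
      · intro j h1 h2
        rcases Nat.lt_or_ge j (i + 1) with h | h
        · exact hconst j h1 (by omega)
        · have : j = i + 1 := by omega
          rw [this, hcs]
    · -- run breaks: a fresh run [lst[i+1]] starts at i+1
      have hcs : PySem.Int.bitCount (lst.getD (i + 1) 0) ≠
          PySem.Int.bitCount (lst.getD s 0) := by
        intro h
        exact hcc (by rw [hconst i hsle (le_refl i), ← h])
      refine ⟨i + 1, (if i + 1 - s > pl then s else p), (if i + 1 - s > pl then i + 1 - s else pl),
        rs' ++ [(lst.drop s).take (i + 1 - s)], ?_, le_refl _, ?_, ?_, ?_⟩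
      · rw [hfold', hfold]
        simp only [pvStepB, show (1 + i : Nat) = i + 1 by omega, show i + 1 - 1 = i by omega]
        rw [if_pos hcc,
            if_neg (show ¬ i + 1 + 1 - (i + 1) > (if i + 1 - s > pl then i + 1 - s else pl) by
              split_ifs with h <;> omega)]
        split_ifs with h <;> rfl
      · rw [hruns']
        simp only [pvRunStep, List.getLast?_concat]
        rw [hhead, if_neg (fun h => hcs h.symm), show i + 1 + 1 - (i + 1) = 1 by omega,
            pv_take_one_drop lst (i + 1) hi1]
      · intro j h1 h2
        have : j = i + 1 := by omega
        rw [this]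
      · refine Or.inr ⟨by simp, ?_, by split_ifs with h <;> omega,
          by split_ifs with h <;> omega⟩
        rcases hbest with ⟨hrs, hpl⟩ | ⟨hrs, hbv, hple, hplb⟩
        · subst hrs
          rw [if_pos (by omega), if_pos (by omega)]
          simp [pvBval]
        · rw [pv_bval_concat rs' _ hrs, pvBestStep, hbv]
          have hlenp : ((lst.drop p).take pl).length = pl := by
            simp only [List.length_take, List.length_drop]; omega
          rw [hcurlen, hlenp]
          split_ifs with h <;> simp

-- ===== VERDICT (by name: the statement is the Claim_ definition above) =====
theorem get_longest_same_bit_counts_spec : Claim_equal_get_longest_same_bit_counts := by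
  intro lst _ hpre
  obtain ⟨hne, hrest⟩ := hpre
  unfold Spec_get_longest_same_bit_counts
  rcases hrest with hlen | hnn
  · -- length 1: the loop bodies never run in either program
    obtain ⟨a, tl, rfl⟩ := List.exists_cons_of_ne_nil hne
    have : tl = [] := by simpa using hlen
    subst this
    simp only [get_longest_same_bit_counts, get_longest_same_bit_counts_alt]
    rw [pvLoopA, dif_neg (show ¬ (1 : Nat) < [a].length by simp)]
    simp [pvRunStep]
  · -- general case via the loop correspondence and the run-list invariant
    have hlen1 : 1 ≤ lst.length := by
      cases lst with
      | nil => exact absurd rfl hne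
      | cons a t => simp
    have hbest0 : [lst.getD 0 0] = (lst.drop 0).take 1 :=
      (pv_take_one_drop lst 0 (by omega)).symm
    have hA := pv_loop_eq lst hnn (lst.length - 1) 1 0 0 0 1 (by omega) (by omega)
      (by omega) (by omega) (by omega) (by omega)
    obtain ⟨s, p, pl, rs', hfold, hsle, hruns, hconst, hbest⟩ :=
      pv_invariant lst (lst.length - 1) (by omega)
    rw [show lst.length - 1 + 1 = lst.length by omega] at hfold hruns
    rw [List.take_length] at hruns
    have hcur : (lst.drop s).take (lst.length - s) = lst.drop s :=
      List.take_of_length_le (by simp only [List.length_drop]; exact le_refl _)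
    unfold get_longest_same_bit_counts
    rw [hbest0, hA]
    simp only [hfold]
    have hBalt : get_longest_same_bit_counts_alt lst =
        pvBval (rs' ++ [(lst.drop s).take (lst.length - s)]) := by
      unfold get_longest_same_bit_counts_alt pvBval
      rw [hruns]
    rw [hBalt]
    have hslice : ∀ b l : Nat,
        PySem.List.slice lst (some (b : Int)) (some ((b : Int) + (l : Int))) =
          (lst.drop b).take l := by
      intro b l
      rw [show ((b : Int) + (l : Int)) = ((b + l : Nat) : Int) by push_cast; ring,
          pv_slice_nat]
      congr 1
      omega
    rcases hbest with ⟨hrs, hpl⟩ | ⟨hrs, hbv, hple, hplb⟩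
    · subst hrs hpl
      rw [if_pos (by omega)]
      simp only
      rw [hslice s (lst.length - s), hcur]
      simp [pvBval]
    · rw [pv_bval_concat rs' _ hrs, pvBestStep, hbv]
      have hlenp : ((lst.drop p).take pl).length = pl := by
        simp only [List.length_take, List.length_drop]; omega
      have hlenc : ((lst.drop s).take (lst.length - s)).length = lst.length - s := by
        simp only [List.length_take, List.length_drop]; omega
      rw [hlenp, hlenc]
      by_cases h : lst.length - s > pl
      · rw [if_pos h, if_pos h]
        simp only
        rw [hslice s (lst.length - s)]
      · rw [if_neg h, if_neg h]
        simp only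
        rw [hslice p pl]
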